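-- pv_equiv track=rewrite | github.com/harashish-arora/glass-onion | regime-i/redundancy.py | get_feature_categories
-- ===== SOURCE A (Python) =====
-- def get_feature_categories(columns):
--     """Categorize features after removing Morgan and MACCS."""
--     categories = {
--         'COMPOSITIONAL': [],
--         'TOPOLOGICAL': [],
--         'ENERGETIC': [],
--         'PHYSICOCHEMICAL': []
--     }
--
--     # Count-based features
--     count_features = {
--         'NHOHCount', 'NOCount', 'NumAliphaticCarbocycles', 'NumAliphaticHeterocycles',
--         'NumAliphaticRings', 'NumAromaticCarbocycles', 'NumAromaticHeterocycles',
--         'NumAromaticRings', 'NumHAcceptors', 'NumHDonors', 'NumHeteroatoms',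
--         'NumRadicalElectrons', 'NumRotatableBonds', 'NumSaturatedCarbocycles',
--         'NumSaturatedHeterocycles', 'NumSaturatedRings', 'NumValenceElectrons',
--         'RingCount', 'HeavyAtomCount', 'total_atoms', 'MolWt', 'ExactMolWt', 'HeavyAtomMolWt'
--     }
--
--     # Topological features (excluding Morgan and MACCS)
--     topological_features = {
--         'FpDensityMorgan1', 'FpDensityMorgan2', 'FpDensityMorgan3',
--         'BalabanJ', 'BertzCT', 'Kappa1', 'Kappa2', 'HallKierAlpha',
--         'Chi0', 'Chi0n', 'Chi0v', 'Chi1', 'Chi1n', 'Chi1v',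
--         'Chi2n', 'Chi2v', 'Chi3n', 'Chi3v', 'Chi4n', 'Chi4v'
--     }
--
--     # Property-based descriptors
--     property_descriptors = {
--         'EState_VSA1', 'EState_VSA10', 'EState_VSA11', 'EState_VSA2', 'EState_VSA3',
--         'EState_VSA4', 'EState_VSA5', 'EState_VSA6', 'EState_VSA7', 'EState_VSA8', 'EState_VSA9',
--         'FractionCSP3', 'MaxAbsEStateIndex', 'MaxAbsPartialCharge', 'MaxEStateIndex',
--         'MaxPartialCharge', 'MinAbsEStateIndex', 'MinAbsPartialCharge', 'MinEStateIndex',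
--         'MinPartialCharge', 'MolLogP',
--         'PEOE_VSA1', 'PEOE_VSA10', 'PEOE_VSA11', 'PEOE_VSA12', 'PEOE_VSA13',
--         'PEOE_VSA14', 'PEOE_VSA2', 'PEOE_VSA3', 'PEOE_VSA4', 'PEOE_VSA5',
--         'PEOE_VSA6', 'PEOE_VSA7', 'PEOE_VSA8', 'PEOE_VSA9',
--         'TPSA', 'qed'
--     }
--
--     for i, col in enumerate(columns):
--         # Skip Morgan and MACCS
--         if col.startswith('Morgan_') or col.startswith('MACCS_'):
--             continue
--
--         # COMPOSITIONAL
--         if (col.startswith('num_') or col.startswith('fr_') or col in count_features):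
--             categories['COMPOSITIONAL'].append((i, col))
--         # TOPOLOGICAL
--         elif (col.startswith('mose_') or col.startswith('AUTOCORR2D_') or col in topological_features):
--             categories['TOPOLOGICAL'].append((i, col))
--         # ENERGETIC
--         elif col == 'pred_Tm' or col.startswith('abraham_'):
--             categories['ENERGETIC'].append((i, col))
--         # PHYSICOCHEMICAL
--         elif col in property_descriptors:
--             categories['PHYSICOCHEMICAL'].append((i, col))
--
--     return categories
-- ===== SOURCE B (Python) =====
-- # Hash-based rewrite: classification is two dict lookups (exact name, then the
-- # head token up to the first '_'), and the result is built per category by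
-- # comprehension passes -- no startswith scans, no if/elif ladder, no dict mutation.
--
-- _COUNT = (
--     'NHOHCount', 'NOCount', 'NumAliphaticCarbocycles', 'NumAliphaticHeterocycles',
--     'NumAliphaticRings', 'NumAromaticCarbocycles', 'NumAromaticHeterocycles',
--     'NumAromaticRings', 'NumHAcceptors', 'NumHDonors', 'NumHeteroatoms',
--     'NumRadicalElectrons', 'NumRotatableBonds', 'NumSaturatedCarbocycles',
--     'NumSaturatedHeterocycles', 'NumSaturatedRings', 'NumValenceElectrons',
--     'RingCount', 'HeavyAtomCount', 'total_atoms', 'MolWt', 'ExactMolWt', 'HeavyAtomMolWt'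
-- )
--
-- _TOPO = (
--     'FpDensityMorgan1', 'FpDensityMorgan2', 'FpDensityMorgan3',
--     'BalabanJ', 'BertzCT', 'Kappa1', 'Kappa2', 'HallKierAlpha',
--     'Chi0', 'Chi0n', 'Chi0v', 'Chi1', 'Chi1n', 'Chi1v',
--     'Chi2n', 'Chi2v', 'Chi3n', 'Chi3v', 'Chi4n', 'Chi4v'
-- )
--
-- _PROP = (
--     'EState_VSA1', 'EState_VSA10', 'EState_VSA11', 'EState_VSA2', 'EState_VSA3',
--     'EState_VSA4', 'EState_VSA5', 'EState_VSA6', 'EState_VSA7', 'EState_VSA8', 'EState_VSA9',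
--     'FractionCSP3', 'MaxAbsEStateIndex', 'MaxAbsPartialCharge', 'MaxEStateIndex',
--     'MaxPartialCharge', 'MinAbsEStateIndex', 'MinAbsPartialCharge', 'MinEStateIndex',
--     'MinPartialCharge', 'MolLogP',
--     'PEOE_VSA1', 'PEOE_VSA10', 'PEOE_VSA11', 'PEOE_VSA12', 'PEOE_VSA13',
--     'PEOE_VSA14', 'PEOE_VSA2', 'PEOE_VSA3', 'PEOE_VSA4', 'PEOE_VSA5',
--     'PEOE_VSA6', 'PEOE_VSA7', 'PEOE_VSA8', 'PEOE_VSA9',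
--     'TPSA', 'qed'
-- )
--
-- # exact-name -> category (the three groups are pairwise disjoint, plus 'pred_Tm')
-- _EXACT = {**dict.fromkeys(_COUNT, 'COMPOSITIONAL'),
--           **dict.fromkeys(_TOPO, 'TOPOLOGICAL'),
--           **dict.fromkeys(_PROP, 'PHYSICOCHEMICAL'),
--           'pred_Tm': 'ENERGETIC'}
--
-- # head token (everything up to and including the FIRST '_') -> category;
-- # every categorizing prefix ends at its first '_', and no exact name's head
-- # token collides with these keys, so lookup order cannot change any answer.
-- _HEAD = {'num_': 'COMPOSITIONAL', 'fr_': 'COMPOSITIONAL',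
--          'mose_': 'TOPOLOGICAL', 'AUTOCORR2D_': 'TOPOLOGICAL',
--          'abraham_': 'ENERGETIC'}
-- # (Morgan_/MACCS_ columns are skipped simply by being absent from both tables.)
--
--
-- def _classify(col):
--     cat = _EXACT.get(col)
--     if cat is None:
--         u = col.find('_')
--         if u != -1:
--             cat = _HEAD.get(col[:u + 1])
--     return cat
--
--
-- def get_feature_categories(columns):
--     """Categorize features after removing Morgan and MACCS."""
--     return {c: [(i, col) for i, col in enumerate(columns) if _classify(col) == c]
--             for c in ('COMPOSITIONAL', 'TOPOLOGICAL', 'ENERGETIC', 'PHYSICOCHEMICAL')}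
-- ===== Notes on version B (the rewrite author's own statement) =====
-- stated objective: alternative
-- what changed: Classification becomes two hash lookups (exact column name, then the head token up to the first '_') in precomputed name->category dicts, and the output is built by one comprehension pass per category instead of mutating a dict inside an if/elif prefix-scanning ladder.
import Mathlib
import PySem

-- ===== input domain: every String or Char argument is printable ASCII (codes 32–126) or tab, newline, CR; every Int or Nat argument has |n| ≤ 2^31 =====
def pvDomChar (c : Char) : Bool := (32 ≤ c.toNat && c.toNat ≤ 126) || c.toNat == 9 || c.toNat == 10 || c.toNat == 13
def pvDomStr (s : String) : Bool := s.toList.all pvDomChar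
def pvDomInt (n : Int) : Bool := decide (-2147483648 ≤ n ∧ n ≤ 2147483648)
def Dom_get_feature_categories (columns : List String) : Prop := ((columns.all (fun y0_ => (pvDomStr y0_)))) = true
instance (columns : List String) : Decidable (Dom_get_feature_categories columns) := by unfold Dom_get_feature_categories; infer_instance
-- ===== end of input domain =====

-- B replaces A's startswith-scanning if/elif ladder and in-place dict mutation by a pure
-- table-driven classifier (two hash lookups: exact name, then the head token up to the
-- first '_') and one comprehension pass per category (objective: alternative).

-- ===== PORT A =====
def pvCountFeatures : PySem.Set String := PySem.Set.ofList [
  "NHOHCount", "NOCount", "NumAliphaticCarbocycles", "NumAliphaticHeterocycles",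
  "NumAliphaticRings", "NumAromaticCarbocycles", "NumAromaticHeterocycles", "NumAromaticRings",
  "NumHAcceptors", "NumHDonors", "NumHeteroatoms", "NumRadicalElectrons",
  "NumRotatableBonds", "NumSaturatedCarbocycles", "NumSaturatedHeterocycles", "NumSaturatedRings",
  "NumValenceElectrons", "RingCount", "HeavyAtomCount", "total_atoms",
  "MolWt", "ExactMolWt", "HeavyAtomMolWt"]

def pvTopologicalFeatures : PySem.Set String := PySem.Set.ofList [
  "FpDensityMorgan1", "FpDensityMorgan2", "FpDensityMorgan3", "BalabanJ",
  "BertzCT", "Kappa1", "Kappa2", "HallKierAlpha",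
  "Chi0", "Chi0n", "Chi0v", "Chi1",
  "Chi1n", "Chi1v", "Chi2n", "Chi2v",
  "Chi3n", "Chi3v", "Chi4n", "Chi4v"]

def pvPropertyDescriptors : PySem.Set String := PySem.Set.ofList [
  "EState_VSA1", "EState_VSA10", "EState_VSA11", "EState_VSA2",
  "EState_VSA3", "EState_VSA4", "EState_VSA5", "EState_VSA6",
  "EState_VSA7", "EState_VSA8", "EState_VSA9", "FractionCSP3",
  "MaxAbsEStateIndex", "MaxAbsPartialCharge", "MaxEStateIndex", "MaxPartialCharge",
  "MinAbsEStateIndex", "MinAbsPartialCharge", "MinEStateIndex", "MinPartialCharge",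
  "MolLogP", "PEOE_VSA1", "PEOE_VSA10", "PEOE_VSA11",
  "PEOE_VSA12", "PEOE_VSA13", "PEOE_VSA14", "PEOE_VSA2",
  "PEOE_VSA3", "PEOE_VSA4", "PEOE_VSA5", "PEOE_VSA6",
  "PEOE_VSA7", "PEOE_VSA8", "PEOE_VSA9", "TPSA",
  "qed"]

-- the if/elif ladder body of A's loop, as one fold step
def pvStepA (categories : PySem.Dict String (List (Int × String))) (p : Int × String) :
    PySem.Dict String (List (Int × String)) :=
  let i := p.1
  let col := p.2
  if PySem.Str.startswith col "Morgan_" || PySem.Str.startswith col "MACCS_" then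
    categories
  else if PySem.Str.startswith col "num_" || PySem.Str.startswith col "fr_"
      || PySem.Set.contains pvCountFeatures col then
    categories.modify "COMPOSITIONAL" [] (· ++ [(i, col)])
  else if PySem.Str.startswith col "mose_" || PySem.Str.startswith col "AUTOCORR2D_"
      || PySem.Set.contains pvTopologicalFeatures col then
    categories.modify "TOPOLOGICAL" [] (· ++ [(i, col)])
  else if col == "pred_Tm" || PySem.Str.startswith col "abraham_" then
    categories.modify "ENERGETIC" [] (· ++ [(i, col)])
  else if PySem.Set.contains pvPropertyDescriptors col then
    categories.modify "PHYSICOCHEMICAL" [] (· ++ [(i, col)])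
  else
    categories

def get_feature_categories (columns : List String) : List (String × List (Int × String)) :=
  let categories : PySem.Dict String (List (Int × String)) :=
    PySem.Dict.ofList [("COMPOSITIONAL", []), ("TOPOLOGICAL", []), ("ENERGETIC", []), ("PHYSICOCHEMICAL", [])]
  ((PySem.List.enumerate columns 0).foldl pvStepA categories).items

-- ===== PORT B =====
-- _EXACT: exact column name -> category (insertion order of Source B's merged table)
def pvExactPairs : List (String × String) := [
  ("NHOHCount", "COMPOSITIONAL"), ("NOCount", "COMPOSITIONAL"), ("NumAliphaticCarbocycles", "COMPOSITIONAL"),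
  ("NumAliphaticHeterocycles", "COMPOSITIONAL"), ("NumAliphaticRings", "COMPOSITIONAL"), ("NumAromaticCarbocycles", "COMPOSITIONAL"),
  ("NumAromaticHeterocycles", "COMPOSITIONAL"), ("NumAromaticRings", "COMPOSITIONAL"), ("NumHAcceptors", "COMPOSITIONAL"),
  ("NumHDonors", "COMPOSITIONAL"), ("NumHeteroatoms", "COMPOSITIONAL"), ("NumRadicalElectrons", "COMPOSITIONAL"),
  ("NumRotatableBonds", "COMPOSITIONAL"), ("NumSaturatedCarbocycles", "COMPOSITIONAL"), ("NumSaturatedHeterocycles", "COMPOSITIONAL"),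
  ("NumSaturatedRings", "COMPOSITIONAL"), ("NumValenceElectrons", "COMPOSITIONAL"), ("RingCount", "COMPOSITIONAL"),
  ("HeavyAtomCount", "COMPOSITIONAL"), ("total_atoms", "COMPOSITIONAL"), ("MolWt", "COMPOSITIONAL"),
  ("ExactMolWt", "COMPOSITIONAL"), ("HeavyAtomMolWt", "COMPOSITIONAL"), ("FpDensityMorgan1", "TOPOLOGICAL"),
  ("FpDensityMorgan2", "TOPOLOGICAL"), ("FpDensityMorgan3", "TOPOLOGICAL"), ("BalabanJ", "TOPOLOGICAL"),
  ("BertzCT", "TOPOLOGICAL"), ("Kappa1", "TOPOLOGICAL"), ("Kappa2", "TOPOLOGICAL"),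
  ("HallKierAlpha", "TOPOLOGICAL"), ("Chi0", "TOPOLOGICAL"), ("Chi0n", "TOPOLOGICAL"),
  ("Chi0v", "TOPOLOGICAL"), ("Chi1", "TOPOLOGICAL"), ("Chi1n", "TOPOLOGICAL"),
  ("Chi1v", "TOPOLOGICAL"), ("Chi2n", "TOPOLOGICAL"), ("Chi2v", "TOPOLOGICAL"),
  ("Chi3n", "TOPOLOGICAL"), ("Chi3v", "TOPOLOGICAL"), ("Chi4n", "TOPOLOGICAL"),
  ("Chi4v", "TOPOLOGICAL"), ("EState_VSA1", "PHYSICOCHEMICAL"), ("EState_VSA10", "PHYSICOCHEMICAL"),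
  ("EState_VSA11", "PHYSICOCHEMICAL"), ("EState_VSA2", "PHYSICOCHEMICAL"), ("EState_VSA3", "PHYSICOCHEMICAL"),
  ("EState_VSA4", "PHYSICOCHEMICAL"), ("EState_VSA5", "PHYSICOCHEMICAL"), ("EState_VSA6", "PHYSICOCHEMICAL"),
  ("EState_VSA7", "PHYSICOCHEMICAL"), ("EState_VSA8", "PHYSICOCHEMICAL"), ("EState_VSA9", "PHYSICOCHEMICAL"),
  ("FractionCSP3", "PHYSICOCHEMICAL"), ("MaxAbsEStateIndex", "PHYSICOCHEMICAL"), ("MaxAbsPartialCharge", "PHYSICOCHEMICAL"),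
  ("MaxEStateIndex", "PHYSICOCHEMICAL"), ("MaxPartialCharge", "PHYSICOCHEMICAL"), ("MinAbsEStateIndex", "PHYSICOCHEMICAL"),
  ("MinAbsPartialCharge", "PHYSICOCHEMICAL"), ("MinEStateIndex", "PHYSICOCHEMICAL"), ("MinPartialCharge", "PHYSICOCHEMICAL"),
  ("MolLogP", "PHYSICOCHEMICAL"), ("PEOE_VSA1", "PHYSICOCHEMICAL"), ("PEOE_VSA10", "PHYSICOCHEMICAL"),
  ("PEOE_VSA11", "PHYSICOCHEMICAL"), ("PEOE_VSA12", "PHYSICOCHEMICAL"), ("PEOE_VSA13", "PHYSICOCHEMICAL"),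
  ("PEOE_VSA14", "PHYSICOCHEMICAL"), ("PEOE_VSA2", "PHYSICOCHEMICAL"), ("PEOE_VSA3", "PHYSICOCHEMICAL"),
  ("PEOE_VSA4", "PHYSICOCHEMICAL"), ("PEOE_VSA5", "PHYSICOCHEMICAL"), ("PEOE_VSA6", "PHYSICOCHEMICAL"),
  ("PEOE_VSA7", "PHYSICOCHEMICAL"), ("PEOE_VSA8", "PHYSICOCHEMICAL"), ("PEOE_VSA9", "PHYSICOCHEMICAL"),
  ("TPSA", "PHYSICOCHEMICAL"), ("qed", "PHYSICOCHEMICAL"), ("pred_Tm", "ENERGETIC")]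

def pvExact : PySem.Dict String String := PySem.Dict.ofList pvExactPairs

-- _HEAD: head token (up to and including the first '_') -> category
def pvHead : PySem.Dict String String := PySem.Dict.ofList [
  ("num_", "COMPOSITIONAL"), ("fr_", "COMPOSITIONAL"),
  ("mose_", "TOPOLOGICAL"), ("AUTOCORR2D_", "TOPOLOGICAL"),
  ("abraham_", "ENERGETIC")]

-- _classify. (Python's 'cat = _EXACT.get(col); if cat is None: ...' as a match.)
def pvClassify (col : String) : Option String :=
  match pvExact.get? col with
  | some cat => some cat
  | none =>
    let u := PySem.Str.find col "_"
    if u ≠ -1 then pvHead.get? (PySem.Str.slice col none (some (u + 1))) else none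

-- the dict comprehension over the four category names (distinct keys, insertion order)
def get_feature_categories_alt (columns : List String) : List (String × List (Int × String)) :=
  ["COMPOSITIONAL", "TOPOLOGICAL", "ENERGETIC", "PHYSICOCHEMICAL"].map
    (fun c => (c, (PySem.List.enumerate columns 0).filter (fun p => pvClassify p.2 == some c)))

-- ===== PRECONDITION & SPEC =====
def Spec_get_feature_categories (columns : List String) (out : List (String × List (Int × String))) : Prop := out = get_feature_categories_alt columns
instance (columns : List String) (out : List (String × List (Int × String))) : Decidable (Spec_get_feature_categories columns out) := by unfold Spec_get_feature_categories; infer_instance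

-- ===== CLAIM (what is proved, stated in full; the proofs are below) =====
def Claim_equal_get_feature_categories : Prop := ∀ (columns : List String), Dom_get_feature_categories columns → Spec_get_feature_categories columns (get_feature_categories columns)

-- ===== LEMMAS AND PROOFS =====

set_option maxRecDepth 8192

-- A's ladder as a classifier (proof-only helper; mirrors pvStepA's conditions)
def pvClassA (col : String) : Option String :=
  if PySem.Str.startswith col "Morgan_" || PySem.Str.startswith col "MACCS_" then none
  else if PySem.Str.startswith col "num_" || PySem.Str.startswith col "fr_"
      || PySem.Set.contains pvCountFeatures col then some "COMPOSITIONAL"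
  else if PySem.Str.startswith col "mose_" || PySem.Str.startswith col "AUTOCORR2D_"
      || PySem.Set.contains pvTopologicalFeatures col then some "TOPOLOGICAL"
  else if col == "pred_Tm" || PySem.Str.startswith col "abraham_" then some "ENERGETIC"
  else if PySem.Set.contains pvPropertyDescriptors col then some "PHYSICOCHEMICAL"
  else none

theorem stepA_eq (d : PySem.Dict String (List (Int × String))) (p : Int × String) :
    pvStepA d p = match pvClassA p.2 with
      | some c => d.modify c [] (· ++ [p])
      | none => d := by
  obtain ⟨i, col⟩ := p
  simp only [pvStepA, pvClassA]
  split_ifs <;> rfl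

theorem foldA_eq (l : List (Int × String)) (d : PySem.Dict String (List (Int × String))) :
    l.foldl pvStepA d
      = (l.filterMap (fun p => (pvClassA p.2).map (fun c => (c, p)))).foldl
          (fun d q => d.modify q.1 [] (· ++ [q.2])) d := by
  induction l generalizing d with
  | nil => rfl
  | cons p t ih =>
    simp only [List.foldl_cons, List.filterMap_cons, stepA_eq]
    cases h : pvClassA p.2 with
    | none => simp [ih]
    | some c => simp [ih]

theorem classA_mem (col : String) (c : String) (h : pvClassA col = some c) :
    c ∈ ["COMPOSITIONAL", "TOPOLOGICAL", "ENERGETIC", "PHYSICOCHEMICAL"] := by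
  unfold pvClassA at h
  split_ifs at h <;> simp_all

-- pvExact as a literal items list (no duplicate keys, so ofList is just mk)
theorem pvExact_items : pvExact.items = pvExactPairs := by decide

theorem pvHead_mk : pvHead = PySem.Dict.mk
    [("num_", "COMPOSITIONAL"), ("fr_", "COMPOSITIONAL"),
     ("mose_", "TOPOLOGICAL"), ("AUTOCORR2D_", "TOPOLOGICAL"),
     ("abraham_", "ENERGETIC")] := by decide

-- a Bool equal to the truth value of an iff
theorem bool_of_iff (b : Bool) (p : Prop) [Decidable p] (h : b = true ↔ p) :
    b = decide p := by
  by_cases hp : p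
  · simp only [hp, decide_true]; exact h.mpr hp
  · simp only [hp, decide_false]
    rw [Bool.eq_false_iff]
    exact fun hb => hp (h.mp hb)

-- core token lemma: for a pattern q ++ ['_'] with no '_' in q, "cs starts with it"
-- is the same as "the token up to (and including) the first '_' of cs equals it"
theorem tok_iff (cs q : List Char) (hq : '_' ∉ q)
    (hf : PySem.Chars.find cs ['_'] ≠ -1) :
    (PySem.Chars.startswith cs (q ++ ['_']) = true) ↔
      List.take (PySem.Chars.find cs ['_'] + 1).toNat cs = q ++ ['_'] := by
  have h0 : 0 ≤ PySem.Chars.find cs ['_'] := by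
    have := PySem.Chars.neg_one_le_find cs ['_']; omega
  obtain ⟨hpre, hmin⟩ := PySem.Chars.find_spec h0
  have hcast : (PySem.Chars.find cs ['_'] + 1).toNat = (PySem.Chars.find cs ['_']).toNat + 1 := by
    omega
  have hu_lt : (PySem.Chars.find cs ['_']).toNat < cs.length := by
    obtain ⟨t, ht⟩ := hpre
    have := congrArg List.length ht
    simp [List.length_drop] at this
    omega
  constructor
  · intro hsw
    obtain ⟨r, hr⟩ := (PySem.Chars.startswith_iff _ _).mp hsw
    have hcs : cs = q ++ '_' :: r := by
      rw [← hr]; simp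
    have h1 : ['_'] <+: cs.drop q.length := by
      refine ⟨r, ?_⟩
      rw [hcs, List.drop_append_of_le_length (le_refl _)]
      simp
    have hno : ∀ i, i < q.length → ¬ (['_'] <+: cs.drop i) := by
      intro i hi hcon
      obtain ⟨t, ht⟩ := hcon
      rw [hcs, List.drop_append_of_le_length (le_of_lt hi)] at ht
      cases hdq : q.drop i with
      | nil =>
        have := congrArg List.length hdq
        simp [List.length_drop] at this
        omega
      | cons a tl =>
        rw [hdq] at ht
        simp at ht
        have ha : a ∈ q := by
          have : a ∈ q.drop i := by rw [hdq]; exact List.mem_cons_self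
          exact List.mem_of_mem_drop this
        rw [← ht.1] at ha
        exact hq ha
    have hqu : (PySem.Chars.find cs ['_']).toNat = q.length := by
      rcases lt_trichotomy (PySem.Chars.find cs ['_']).toNat q.length with h | h | h
      · exact absurd hpre (hno _ h)
      · exact h
      · exact absurd h1 (hmin _ h)
    rw [hcast, hqu, ← hr]
    have : q.length + 1 = (q ++ ['_']).length := by simp
    rw [this, List.take_left]
  · intro htok
    exact (PySem.Chars.startswith_iff _ _).mpr
      ⟨cs.drop (PySem.Chars.find cs ['_'] + 1).toNat,
        by rw [← htok]; exact List.take_append_drop _ _⟩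

-- Str-level version, phrased on the token string col[:u+1]
theorem sw_iff_tok (col p : String) (q : List Char) (hpq : p.toList = q ++ ['_'])
    (hq : '_' ∉ q) (hf : PySem.Str.find col "_" ≠ -1) :
    (PySem.Str.startswith col p = true ↔
      PySem.Str.slice col none (some (PySem.Str.find col "_" + 1)) = p) := by
  have htl : ("_" : String).toList = ['_'] := by decide
  have hfind : PySem.Str.find col "_" = PySem.Chars.find col.toList ['_'] := by
    rw [PySem.Str.find_eq, htl]
  have h0 : 0 ≤ PySem.Chars.find col.toList ['_'] + 1 := by
    have := PySem.Chars.neg_one_le_find col.toList ['_']; omega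
  rw [← String.toList_inj, PySem.Str.toList_slice, PySem.Chars.slice_eq_listSlice,
    hfind, PySem.List.slice_to col.toList h0, hpq]
  rw [show PySem.Str.startswith col p = PySem.Chars.startswith col.toList p.toList from
    PySem.Str.startswith_eq col p, hpq]
  exact tok_iff col.toList q hq (by rw [hfind] at hf; exact hf)

-- with no '_' in col at all, no pattern containing '_' can be a prefix
theorem sw_false (col p : String) (hp : '_' ∈ p.toList)
    (hf : PySem.Str.find col "_" = -1) : PySem.Str.startswith col p = false := by
  have htl : ("_" : String).toList = ['_'] := by decide
  have hfind : PySem.Chars.find col.toList ['_'] = -1 := by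
    rw [PySem.Str.find_eq, htl] at hf; exact hf
  have hni : ¬ (['_'] <:+: col.toList) := (PySem.Chars.find_eq_neg_one_iff _ _).mp hfind
  rw [Bool.eq_false_iff]
  intro hsw
  have hpre : p.toList <+: col.toList := by
    rw [PySem.Str.startswith_eq] at hsw
    exact (PySem.Chars.startswith_iff _ _).mp hsw
  obtain ⟨s, t, hst⟩ := List.append_of_mem hp
  exact hni (List.IsInfix.trans ⟨s, t, by rw [hst]; simp⟩ hpre.isInfix)

-- the three Sets, evaluated to their literal element lists
theorem pvCount_lit : pvCountFeatures = [
  "NHOHCount", "NOCount", "NumAliphaticCarbocycles", "NumAliphaticHeterocycles",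
  "NumAliphaticRings", "NumAromaticCarbocycles", "NumAromaticHeterocycles", "NumAromaticRings",
  "NumHAcceptors", "NumHDonors", "NumHeteroatoms", "NumRadicalElectrons",
  "NumRotatableBonds", "NumSaturatedCarbocycles", "NumSaturatedHeterocycles", "NumSaturatedRings",
  "NumValenceElectrons", "RingCount", "HeavyAtomCount", "total_atoms",
  "MolWt", "ExactMolWt", "HeavyAtomMolWt"] := by decide

theorem pvTopo_lit : pvTopologicalFeatures = [
  "FpDensityMorgan1", "FpDensityMorgan2", "FpDensityMorgan3", "BalabanJ",
  "BertzCT", "Kappa1", "Kappa2", "HallKierAlpha",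
  "Chi0", "Chi0n", "Chi0v", "Chi1",
  "Chi1n", "Chi1v", "Chi2n", "Chi2v",
  "Chi3n", "Chi3v", "Chi4n", "Chi4v"] := by decide

theorem pvProp_lit : pvPropertyDescriptors = [
  "EState_VSA1", "EState_VSA10", "EState_VSA11", "EState_VSA2",
  "EState_VSA3", "EState_VSA4", "EState_VSA5", "EState_VSA6",
  "EState_VSA7", "EState_VSA8", "EState_VSA9", "FractionCSP3",
  "MaxAbsEStateIndex", "MaxAbsPartialCharge", "MaxEStateIndex", "MaxPartialCharge",
  "MinAbsEStateIndex", "MinAbsPartialCharge", "MinEStateIndex", "MinPartialCharge",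
  "MolLogP", "PEOE_VSA1", "PEOE_VSA10", "PEOE_VSA11",
  "PEOE_VSA12", "PEOE_VSA13", "PEOE_VSA14", "PEOE_VSA2",
  "PEOE_VSA3", "PEOE_VSA4", "PEOE_VSA5", "PEOE_VSA6",
  "PEOE_VSA7", "PEOE_VSA8", "PEOE_VSA9", "TPSA",
  "qed"] := by decide

-- pvClassA with the set constants replaced by their literal lists (cheap to evaluate)
def pvClassA2 (col : String) : Option String :=
  if PySem.Str.startswith col "Morgan_" || PySem.Str.startswith col "MACCS_" then none
  else if PySem.Str.startswith col "num_" || PySem.Str.startswith col "fr_"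
      || PySem.Set.contains [
  "NHOHCount", "NOCount", "NumAliphaticCarbocycles", "NumAliphaticHeterocycles",
  "NumAliphaticRings", "NumAromaticCarbocycles", "NumAromaticHeterocycles", "NumAromaticRings",
  "NumHAcceptors", "NumHDonors", "NumHeteroatoms", "NumRadicalElectrons",
  "NumRotatableBonds", "NumSaturatedCarbocycles", "NumSaturatedHeterocycles", "NumSaturatedRings",
  "NumValenceElectrons", "RingCount", "HeavyAtomCount", "total_atoms",
  "MolWt", "ExactMolWt", "HeavyAtomMolWt"] col then some "COMPOSITIONAL"
  else if PySem.Str.startswith col "mose_" || PySem.Str.startswith col "AUTOCORR2D_"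
      || PySem.Set.contains [
  "FpDensityMorgan1", "FpDensityMorgan2", "FpDensityMorgan3", "BalabanJ",
  "BertzCT", "Kappa1", "Kappa2", "HallKierAlpha",
  "Chi0", "Chi0n", "Chi0v", "Chi1",
  "Chi1n", "Chi1v", "Chi2n", "Chi2v",
  "Chi3n", "Chi3v", "Chi4n", "Chi4v"] col then some "TOPOLOGICAL"
  else if col == "pred_Tm" || PySem.Str.startswith col "abraham_" then some "ENERGETIC"
  else if PySem.Set.contains [
  "EState_VSA1", "EState_VSA10", "EState_VSA11", "EState_VSA2",
  "EState_VSA3", "EState_VSA4", "EState_VSA5", "EState_VSA6",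
  "EState_VSA7", "EState_VSA8", "EState_VSA9", "FractionCSP3",
  "MaxAbsEStateIndex", "MaxAbsPartialCharge", "MaxEStateIndex", "MaxPartialCharge",
  "MinAbsEStateIndex", "MinAbsPartialCharge", "MinEStateIndex", "MinPartialCharge",
  "MolLogP", "PEOE_VSA1", "PEOE_VSA10", "PEOE_VSA11",
  "PEOE_VSA12", "PEOE_VSA13", "PEOE_VSA14", "PEOE_VSA2",
  "PEOE_VSA3", "PEOE_VSA4", "PEOE_VSA5", "PEOE_VSA6",
  "PEOE_VSA7", "PEOE_VSA8", "PEOE_VSA9", "TPSA",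
  "qed"] col then some "PHYSICOCHEMICAL"
  else none

theorem classA2_eq (col : String) : pvClassA col = pvClassA2 col := by
  simp only [pvClassA, pvClassA2, pvCount_lit, pvTopo_lit, pvProp_lit]

theorem pvExact_nodup : pvExact.keys.Nodup := by
  simp only [PySem.Dict.keys, pvExact_items]
  decide

set_option maxHeartbeats 2000000 in
theorem classify_eq_classA (col : String) : pvClassify col = pvClassA col := by
  by_cases hmem : col ∈ pvExactPairs.map Prod.fst
  · have hall : pvExactPairs.all (fun kv => pvClassA2 kv.1 == some kv.2) = true := by decide
    obtain ⟨kv, hkv, hfst⟩ := List.mem_map.mp hmem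
    have hpair : (col, kv.2) ∈ pvExactPairs := by
      rw [← hfst]; exact hkv
    have hmemi : (col, kv.2) ∈ pvExact.items := by
      rw [pvExact_items]; exact hpair
    have hsome : pvExact.get? col = some kv.2 :=
      PySem.Dict.get?_of_mem_items _ hmemi pvExact_nodup
    have hA2 : pvClassA2 col = some kv.2 := by
      have := List.all_eq_true.mp hall kv hkv
      rw [← hfst]
      exact eq_of_beq this
    unfold pvClassify
    rw [hsome, classA2_eq, hA2]
  · have hE : pvExact.get? col = none := by
      rw [PySem.Dict.get?_eq_none_iff_not_mem_keys]
      simp only [PySem.Dict.keys, pvExact_items]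
      exact fun h => hmem (by simpa using h)
    have hcnt : PySem.Set.contains pvCountFeatures col = false := by
      rw [← Bool.not_eq_true, PySem.Set.contains_iff]
      exact fun hx => hmem ((by decide : pvCountFeatures ⊆ pvExactPairs.map Prod.fst) hx)
    have htop : PySem.Set.contains pvTopologicalFeatures col = false := by
      rw [← Bool.not_eq_true, PySem.Set.contains_iff]
      exact fun hx => hmem ((by decide : pvTopologicalFeatures ⊆ pvExactPairs.map Prod.fst) hx)
    have hprop : PySem.Set.contains pvPropertyDescriptors col = false := by
      rw [← Bool.not_eq_true, PySem.Set.contains_iff]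
      exact fun hx => hmem ((by decide : pvPropertyDescriptors ⊆ pvExactPairs.map Prod.fst) hx)
    rw [pvCount_lit] at hcnt
    rw [pvTopo_lit] at htop
    rw [pvProp_lit] at hprop
    have hpred : (col == "pred_Tm") = false := by
      rw [beq_eq_false_iff_ne]
      exact fun h => hmem (by rw [h]; decide)
    unfold pvClassify
    rw [hE]
    rw [classA2_eq]
    simp only [pvClassA2, hcnt, htop, hprop, hpred, Bool.or_false, Bool.false_or]
    by_cases hf : PySem.Str.find col "_" = -1
    · simp only [hf, ne_eq, not_true_eq_false, if_false,
        sw_false col "Morgan_" (by decide) hf, sw_false col "MACCS_" (by decide) hf,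
        sw_false col "num_" (by decide) hf, sw_false col "fr_" (by decide) hf,
        sw_false col "mose_" (by decide) hf, sw_false col "AUTOCORR2D_" (by decide) hf,
        sw_false col "abraham_" (by decide) hf, Bool.or_self]
      simp
    · have b1 := bool_of_iff _ _ (sw_iff_tok col "Morgan_" ['M','o','r','g','a','n'] (by decide) (by decide) hf)
      have b2 := bool_of_iff _ _ (sw_iff_tok col "MACCS_" ['M','A','C','C','S'] (by decide) (by decide) hf)
      have b3 := bool_of_iff _ _ (sw_iff_tok col "num_" ['n','u','m'] (by decide) (by decide) hf)
      have b4 := bool_of_iff _ _ (sw_iff_tok col "fr_" ['f','r'] (by decide) (by decide) hf)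
      have b5 := bool_of_iff _ _ (sw_iff_tok col "mose_" ['m','o','s','e'] (by decide) (by decide) hf)
      have b6 := bool_of_iff _ _ (sw_iff_tok col "AUTOCORR2D_" ['A','U','T','O','C','O','R','R','2','D'] (by decide) (by decide) hf)
      have b7 := bool_of_iff _ _ (sw_iff_tok col "abraham_" ['a','b','r','a','h','a','m'] (by decide) (by decide) hf)
      simp only [hf, ne_eq, not_false_eq_true, if_true, b1, b2, b3, b4, b5, b6, b7]
      rw [pvHead_mk]
      simp only [PySem.Dict.get?_mk_cons, beq_iff_eq, Bool.or_eq_true, decide_eq_true_eq]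
      clear b1 b2 b3 b4 b5 b6 b7 hE hcnt htop hprop hpred hmem hf
      have hemp : ∀ s : String, (PySem.Dict.mk ([] : List (String × String))).get? s = none :=
        fun _ => rfl
      generalize PySem.Str.slice col none (some (PySem.Str.find col "_" + 1)) = tok
      by_cases t1 : tok = "Morgan_"
      · subst t1; decide
      by_cases t2 : tok = "MACCS_"
      · subst t2; decide
      by_cases t3 : tok = "num_"
      · subst t3; decide
      by_cases t4 : tok = "fr_"
      · subst t4; decide
      by_cases t5 : tok = "mose_"
      · subst t5; decide
      by_cases t6 : tok = "AUTOCORR2D_"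
      · subst t6; decide
      by_cases t7 : tok = "abraham_"
      · subst t7; decide
      have s3 : ¬("num_" = tok) := fun h => t3 h.symm
      have s4 : ¬("fr_" = tok) := fun h => t4 h.symm
      have s5 : ¬("mose_" = tok) := fun h => t5 h.symm
      have s6 : ¬("AUTOCORR2D_" = tok) := fun h => t6 h.symm
      have s7 : ¬("abraham_" = tok) := fun h => t7 h.symm
      simp [t1, t2, t3, t4, t5, t6, t7, s3, s4, s5, s6, s7, hemp]

theorem filter_classA (l : List (Int × String)) (c : String) :
    ((l.filterMap (fun p => (pvClassA p.2).map (fun c => (c, p)))).filter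
        (fun q => q.1 == c)).map (fun q => q.2)
      = l.filter (fun p => pvClassA p.2 == some c) := by
  induction l with
  | nil => rfl
  | cons p t ih =>
    simp only [List.filterMap_cons]
    cases h : pvClassA p.2 with
    | none => simp [h, ih]
    | some c' =>
      by_cases hc : c' = c
      · subst hc; simp [h, ih]
      · simp [h, hc, ih]

-- ===== VERDICT (by name: the statement is the Claim_ definition above) =====
theorem get_feature_categories_spec : Claim_equal_get_feature_categories := by
  intro columns _
  unfold Spec_get_feature_categories get_feature_categories get_feature_categories_alt
  show ((PySem.List.enumerate columns 0).foldl pvStepA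
      (PySem.Dict.ofList [("COMPOSITIONAL", []), ("TOPOLOGICAL", []), ("ENERGETIC", []), ("PHYSICOCHEMICAL", [])])).items = _
  rw [foldA_eq]
  set d0 : PySem.Dict String (List (Int × String)) :=
    PySem.Dict.ofList [("COMPOSITIONAL", []), ("TOPOLOGICAL", []), ("ENERGETIC", []), ("PHYSICOCHEMICAL", [])] with hd0
  set L := PySem.List.enumerate columns 0 with hL
  set L' := L.filterMap (fun p => (pvClassA p.2).map (fun c => (c, p))) with hL'
  have hd0keys : d0.keys = ["COMPOSITIONAL", "TOPOLOGICAL", "ENERGETIC", "PHYSICOCHEMICAL"] := by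
    rw [hd0]; decide
  have hkeys : (L'.foldl (fun d q => d.modify q.1 [] (· ++ [q.2])) d0).keys = d0.keys := by
    rw [PySem.Dict.keys_foldl_modify_key L' (fun q => q.1) [] (fun _ q v => v ++ [q.2]) d0]
    rw [PySem.Set.update_eq_append_filter]
    have hnil : (PySem.Set.ofList (L'.map (fun q => q.1))).filter
        (fun y => !(PySem.Set.contains d0.keys y)) = [] := by
      rw [List.filter_eq_nil_iff]
      intro y hy
      have hy' : y ∈ L'.map (fun q => q.1) := (PySem.Set.mem_ofList _ _).mp hy
      obtain ⟨q, hqL, hq1⟩ := List.mem_map.mp hy'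
      obtain ⟨p, _, hgp⟩ := List.mem_filterMap.mp (hL' ▸ hqL)
      obtain ⟨c, hc, hcq⟩ := Option.map_eq_some_iff.mp hgp
      have hcm : y ∈ d0.keys := by
        rw [hd0keys, ← hq1, ← hcq]
        exact classA_mem _ _ hc
      simp [PySem.Set.contains_eq_listContains, hcm]
    rw [hnil, List.append_nil]
  have hnd : (L'.foldl (fun d q => d.modify q.1 [] (· ++ [q.2])) d0).keys.Nodup := by
    rw [hkeys, hd0keys]; decide
  rw [PySem.Dict.items_eq_map_keys _ hnd []]
  rw [hkeys, hd0keys]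
  apply List.map_congr_left
  intro c hc
  rw [PySem.Dict.getD_foldl_modify_append L' d0 c]
  have hgd : d0.getD c [] = [] := by
    fin_cases hc <;> (rw [hd0]; decide)
  rw [hgd, List.nil_append, hL', filter_classA]
  simp only [classify_eq_classA]
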